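-- pv_equiv track=rewrite | github.com/mahmudhasankhan/LeetCode-Supremacy | SQL/datalemur/python/easy/base13convert.py | convertToBase13
-- ===== SOURCE A (Python) =====
-- def convertToBase13(num):
-- 	if num == 0:
-- 	  return "0"
--
-- 	# Digits for base 13
-- 	base13_digits = "0123456789ABC"
-- 	digits = ""
-- 	positive = abs(num)
--
-- 	while positive > 0:
-- 	  digits += base13_digits[positive%13]
-- 	  positive = positive // 13
--
-- 	# Reverse string
-- 	reversed_digits = digits[::-1]
--
-- 	if num < 0:
-- 	  return '-'+reversed_digits
-- 	else:
-- 	  return reversed_digits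
-- ===== SOURCE B (Python) =====
-- def convertToBase13(num):
--     if num == 0:
--         return "0"
--     base13_digits = "0123456789ABC"
--     n = abs(num)
--     # largest power of 13 not exceeding n
--     p = 1
--     while p * 13 <= n:
--         p *= 13
--     # emit digits most-significant-first by dividing out powers
--     out = []
--     while p > 0:
--         out.append(base13_digits[n // p])
--         n %= p
--         p //= 13
--     s = ''.join(out)
--     return '-' + s if num < 0 else s
-- ===== Notes on version B (the rewrite author's own statement) =====
-- stated objective: alternative
-- what changed: Replaces A's least-significant-first digit accumulation followed by a string reversal with a two-phase power-of-13 scheme: first find the largest power of 13 not exceeding |num|, then extract digits most-significant-first by division and remainder, so no reversal pass exists.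
import Mathlib
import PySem

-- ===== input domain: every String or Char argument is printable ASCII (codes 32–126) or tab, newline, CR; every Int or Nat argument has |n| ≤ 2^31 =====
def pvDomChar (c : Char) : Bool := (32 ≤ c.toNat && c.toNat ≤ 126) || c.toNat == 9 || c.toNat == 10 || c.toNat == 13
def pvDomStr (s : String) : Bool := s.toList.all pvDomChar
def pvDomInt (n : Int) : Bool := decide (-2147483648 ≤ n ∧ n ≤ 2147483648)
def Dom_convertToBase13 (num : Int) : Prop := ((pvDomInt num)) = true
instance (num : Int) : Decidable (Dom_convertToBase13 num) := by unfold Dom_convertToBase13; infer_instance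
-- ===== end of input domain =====

-- B replaces A's least-significant-first accumulate-then-reverse loop by a two-phase
-- scheme (largest power of 13 ≤ |num|, then most-significant-first extraction); same
-- asymptotic cost, genuinely different algorithmic structure.

-- ===== PORT A =====
-- base13_digits[r] for r = positive % 13; r < 13 so the index is always in range,
-- making getD exact for Python's base13_digits[positive%13].
def pvDigitA (r : Nat) : Char := "0123456789ABC".toList.getD r ' '

-- the while loop: state (positive, digits); the positive > 0 guard is the Nat pattern match
def pvLoopA : Nat → List Char → List Char
  | 0, digits => digits
  | (n+1), digits => pvLoopA ((n+1) / 13) (digits ++ [pvDigitA ((n+1) % 13)])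
decreasing_by exact Nat.div_lt_self (Nat.succ_pos n) (by norm_num)

def convertToBase13 (num : Int) : String :=
  if num = 0 then "0"
  else
    let digits := pvLoopA num.natAbs []   -- positive = abs(num)
    let reversed_digits := digits.reverse -- digits[::-1]
    if num < 0 then String.ofList ('-' :: reversed_digits) else String.ofList reversed_digits

-- ===== PORT B =====
def pvDigitB (r : Nat) : Char := "0123456789ABC".toList.getD r ' '

-- 'while p * 13 <= n: p *= 13'; the 0 < p conjunct is only a totality guard
-- (the initial call has p = 1 and p only grows), it never fires differently from Python.
def pvPowUp (n p : Nat) : Nat :=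
  if 0 < p ∧ p * 13 ≤ n then pvPowUp n (p * 13) else p
termination_by n - p
decreasing_by omega

-- 'while p > 0: out.append(base13_digits[n // p]); n %= p; p //= 13'
-- n // p < 13 throughout (p is the largest power of 13 ≤ n), so getD is exact for the indexing.
def pvLoopB : Nat → Nat → List Char
  | _, 0 => []
  | n, (p+1) => pvDigitB (n / (p+1)) :: pvLoopB (n % (p+1)) ((p+1) / 13)
decreasing_by exact Nat.div_lt_self (Nat.succ_pos p) (by norm_num)

def convertToBase13_alt (num : Int) : String :=
  if num = 0 then "0"
  else
    let n := num.natAbs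
    let p := pvPowUp n 1
    let s := pvLoopB n p
    if num < 0 then String.ofList ('-' :: s) else String.ofList s

-- ===== PRECONDITION & SPEC =====
def Spec_convertToBase13 (num : Int) (out : String) : Prop := out = convertToBase13_alt num
instance (num : Int) (out : String) : Decidable (Spec_convertToBase13 num out) := by unfold Spec_convertToBase13; infer_instance

-- ===== CLAIM (what is proved, stated in full; the proofs are below) =====
def Claim_equal_convertToBase13 : Prop := ∀ (num : Int), Dom_convertToBase13 num → Spec_convertToBase13 num (convertToBase13 num)

-- ===== LEMMAS AND PROOFS =====

-- most-significant-first digit list of n (no leading zeros), the common normal form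
def pvMsd : Nat → List Char
  | 0 => []
  | (n+1) => pvMsd ((n+1) / 13) ++ [pvDigitA ((n+1) % 13)]
decreasing_by exact Nat.div_lt_self (Nat.succ_pos n) (by norm_num)

-- n written with exactly j base-13 digits (leading zeros allowed), LSD recursion
def pvPad : Nat → Nat → List Char
  | 0, _ => []
  | (j+1), n => pvPad j (n / 13) ++ [pvDigitA (n % 13)]

theorem pvLoopA_eq (n : Nat) : ∀ acc, pvLoopA n acc = acc ++ (pvMsd n).reverse := by
  induction n using Nat.strong_induction_on with
  | _ n ih =>
    intro acc
    match n with
    | 0 => simp [pvLoopA, pvMsd]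
    | (m+1) =>
      rw [pvLoopA, pvMsd, ih ((m+1) / 13) (Nat.div_lt_self (Nat.succ_pos m) (by norm_num))]
      simp

theorem pvPad_msd (j : Nat) : ∀ n, n < 13 ^ (j+1) →
    pvPad (j+1) n = pvDigitA (n / 13 ^ j) :: pvPad j (n % 13 ^ j) := by
  induction j with
  | zero =>
    intro n h
    have hlt : n % 13 = n := Nat.mod_eq_of_lt (by simpa using h)
    simp [pvPad, hlt]
  | succ j ih =>
    intro n h
    have hdiv : n / 13 < 13 ^ (j+1) := by
      have hd : 13 ^ (j+1+1) / 13 = 13 ^ (j+1) := by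
        rw [pow_succ]; exact Nat.mul_div_cancel _ (by norm_num)
      have := Nat.div_lt_div_of_lt_of_dvd (dvd_pow_self 13 (Nat.succ_ne_zero (j+1))) h
      rwa [hd] at this
    rw [pvPad, ih (n / 13) hdiv]
    have h1 : n / 13 / 13 ^ j = n / 13 ^ (j+1) := by
      rw [Nat.div_div_eq_div_mul, pow_succ']
    have h2 : n / 13 % 13 ^ j = n % 13 ^ (j+1) / 13 := by
      rw [pow_succ', Nat.mod_mul_right_div_self]
    have h3 : n % 13 = n % 13 ^ (j+1) % 13 := by
      rw [Nat.mod_mod_of_dvd _ (dvd_pow_self 13 (Nat.succ_ne_zero j))]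
    rw [h1, h2, h3]
    simp [pvPad]

theorem pvPad_eq_msd (j : Nat) : ∀ n, 13 ^ j ≤ n → n < 13 ^ (j+1) → pvPad (j+1) n = pvMsd n := by
  induction j with
  | zero =>
    intro n h1 h2
    simp at h1 h2
    obtain ⟨m, rfl⟩ : ∃ m, n = m + 1 := ⟨n - 1, by omega⟩
    rw [pvMsd, pvPad, pvPad]
    have : (m+1) / 13 = 0 := by omega
    simp [this, pvMsd, Nat.mod_eq_of_lt h2]
  | succ j ih =>
    intro n h1 h2
    obtain ⟨m, rfl⟩ : ∃ m, n = m + 1 := ⟨n - 1, by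
      have : 0 < 13 ^ (j+1) := Nat.pow_pos (by norm_num)
      omega⟩
    rw [pvMsd, pvPad]
    congr 1
    apply ih
    · rw [pow_succ] at h1
      exact Nat.le_div_iff_mul_le (by norm_num) |>.mpr h1
    · rw [pow_succ, mul_comm] at h2
      exact Nat.div_lt_of_lt_mul h2

theorem pvLoopB_pos (n p : Nat) (hp : 0 < p) :
    pvLoopB n p = pvDigitB (n / p) :: pvLoopB (n % p) (p / 13) := by
  obtain ⟨q, rfl⟩ : ∃ q, p = q + 1 := ⟨p - 1, by omega⟩
  rw [pvLoopB]

theorem pvDigitB_eq : pvDigitB = pvDigitA := rfl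

theorem pvLoopB_eq (k : Nat) : ∀ n, n < 13 ^ (k+1) → pvLoopB n (13 ^ k) = pvPad (k+1) n := by
  induction k with
  | zero =>
    intro n h
    simp at h
    rw [pow_zero, pvLoopB_pos n 1 (by norm_num)]
    simp [pvLoopB, pvPad, pvDigitB_eq, Nat.mod_eq_of_lt h]
  | succ k ih =>
    intro n h
    have hpos : 0 < 13 ^ (k+1) := Nat.pow_pos (by norm_num)
    rw [pvLoopB_pos n _ hpos]
    have hd13 : 13 ^ (k+1) / 13 = 13 ^ k := by
      rw [pow_succ]; exact Nat.mul_div_cancel _ (by norm_num)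
    have hmod : n % 13 ^ (k+1) < 13 ^ (k+1) := Nat.mod_lt _ hpos
    have hmod' : n % 13 ^ (k+1) < 13 ^ (k+1) := hmod
    rw [hd13, ih _ hmod']
    rw [pvPad_msd (k+1) n h, pvDigitB_eq]

theorem pvPowUp_spec (n : Nat) : ∀ (fuel p j : Nat), n - p ≤ fuel → p = 13 ^ j → 0 < p → p ≤ n →
    ∃ k, pvPowUp n p = 13 ^ k ∧ 13 ^ k ≤ n ∧ n < 13 ^ (k+1) := by
  intro fuel
  induction fuel with
  | zero =>
    intro p j hf hj hp hle
    have hc : ¬ (0 < p ∧ p * 13 ≤ n) := by omega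
    refine ⟨j, by rw [pvPowUp, if_neg hc]; exact hj, by rw [← hj]; exact hle, ?_⟩
    rw [pow_succ, ← hj]
    omega
  | succ f ih =>
    intro p j hf hj hp hle
    by_cases hc : p * 13 ≤ n
    · rw [pvPowUp, if_pos ⟨hp, hc⟩]
      exact ih (p * 13) (j+1) (by omega) (by rw [hj, pow_succ]) (by omega) hc
    · have hc' : ¬ (0 < p ∧ p * 13 ≤ n) := fun h => hc h.2
      refine ⟨j, by rw [pvPowUp, if_neg hc']; exact hj, by rw [← hj]; exact hle, ?_⟩
      rw [pow_succ, ← hj]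
      omega

-- ===== VERDICT (by name: the statement is the Claim_ definition above) =====
theorem convertToBase13_spec : Claim_equal_convertToBase13 := by
  intro num _
  unfold Spec_convertToBase13 convertToBase13 convertToBase13_alt
  by_cases h : num = 0
  · simp [h]
  · have hn : 0 < num.natAbs := Int.natAbs_pos.mpr h
    obtain ⟨k, hpu, h1, h2⟩ := pvPowUp_spec num.natAbs num.natAbs 1 0 (by omega) (by norm_num) (by norm_num) hn
    have hB : pvLoopB num.natAbs (pvPowUp num.natAbs 1) = pvMsd num.natAbs := by
      rw [hpu, pvLoopB_eq k _ h2, pvPad_eq_msd k _ h1 h2]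
    have hA : (pvLoopA num.natAbs []).reverse = pvMsd num.natAbs := by
      rw [pvLoopA_eq]; simp
    simp only [h, if_false]
    rw [hA, hB]
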